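-- pv_equiv track=rewrite | github.com/sophia62/Language-Translator | finalprojectlanguage.py | translate_svo
-- ===== SOURCE A (Python) =====
-- def translate_svo(sentence, translations):
--     words = sentence.split()
--     chi_translated_parts = {'subject': '', 'verb': '', 'object': ''}
--     eng_reconstruction = {'subject': '', 'verb': '', 'object': ''}
--
--     for word in words:
--         lower_word = word.lower()
--         found = False
--         for category in ['subject', 'verb', 'object']:
--             if lower_word in translations[category]:
--                 chi_translated_parts[category] += translations[category][lower_word]
--                 if not eng_reconstruction[category]:  # Preserve original case for English reconstruction
--                     eng_reconstruction[category] = word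
--                 found = True
--                 break
--         if not found and not eng_reconstruction['object']:
--             eng_reconstruction['object'] += word
--
--     chi_translated_sentence = ''.join(chi_translated_parts.values())
--     eng_ordered = [eng_reconstruction['subject'], eng_reconstruction['verb'], eng_reconstruction['object']]
--     eng_restructured_sentence = ' '.join(filter(None, eng_ordered)).strip()
--
--     return chi_translated_sentence, eng_restructured_sentence
-- ===== SOURCE B (Python) =====
-- def translate_svo(sentence, translations):
--     cats = ('subject', 'verb', 'object')
--
--     def classify(word):
--         lw = word.lower()
--         for c in cats:
--             if lw in translations[c]:
--                 return c
--         return None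
--
--     tagged = [(w, classify(w)) for w in sentence.split()]
--     chi = ''.join(translations[c][w.lower()]
--                   for c in cats for (w, cc) in tagged if cc == c)
--
--     def first(pred):
--         return next((w for (w, c) in tagged if pred(c)), '')
--
--     eng = [first(lambda c: c == 'subject'),
--            first(lambda c: c == 'verb'),
--            first(lambda c: c == 'object' or c is None)]
--     return chi, ' '.join(w for w in eng if w)
-- ===== Notes on version B (the rewrite author's own statement) =====
-- stated objective: alternative
-- what changed: B replaces A's single loop mutating six accumulator slots by a classify-then-assemble decomposition: it first tags every word with its category (subject/verb/object/None), then builds the Chinese string by concatenating per-category translations and the English string from the first word of each slot (object slot = first object-or-unrecognized word).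
import Mathlib
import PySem

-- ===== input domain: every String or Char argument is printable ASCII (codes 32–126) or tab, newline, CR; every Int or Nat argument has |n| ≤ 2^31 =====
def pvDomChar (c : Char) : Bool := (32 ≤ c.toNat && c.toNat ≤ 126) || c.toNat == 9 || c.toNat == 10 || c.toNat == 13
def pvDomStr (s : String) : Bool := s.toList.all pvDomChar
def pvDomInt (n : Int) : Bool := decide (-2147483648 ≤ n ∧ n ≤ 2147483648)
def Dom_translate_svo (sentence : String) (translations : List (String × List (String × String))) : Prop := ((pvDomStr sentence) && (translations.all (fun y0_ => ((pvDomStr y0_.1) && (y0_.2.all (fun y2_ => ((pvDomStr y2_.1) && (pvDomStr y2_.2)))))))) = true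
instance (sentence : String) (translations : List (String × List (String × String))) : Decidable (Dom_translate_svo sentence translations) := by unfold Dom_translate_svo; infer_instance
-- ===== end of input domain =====

-- B replaces A's on-the-fly six-field accumulation by classify-then-assemble (tag each word with its
-- category, then build the Chinese and English parts from the tagged list); objective: alternative, same cost.

-- ===== PORT A =====
-- translations[c] as a dict (shared accessor: both Pythons subscript translations the same way)
def pvCatDict (translations : List (String × List (String × String))) (c : String) :
    PySem.Dict String String :=
  PySem.Dict.mk (PySem.Dict.getD (PySem.Dict.mk translations) c [])

-- the body of A's 'for word in words' loop: state = (chi subject, chi verb, chi object, eng subject, eng verb, eng object)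
def pvA_step (translations : List (String × List (String × String)))
    (st : String × String × String × String × String × String) (word : String) :
    String × String × String × String × String × String :=
  let lw := PySem.Str.lower word
  match st with
  | (cs, cv, co, es, ev, eo) =>
    match PySem.Dict.get? (pvCatDict translations "subject") lw with
    | some t => (cs ++ t, cv, co, if es = "" then word else es, ev, eo)
    | none =>
      match PySem.Dict.get? (pvCatDict translations "verb") lw with
      | some t => (cs, cv ++ t, co, es, if ev = "" then word else ev, eo)
      | none =>
        match PySem.Dict.get? (pvCatDict translations "object") lw with
        | some t => (cs, cv, co ++ t, es, ev, if eo = "" then word else eo)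
        | none => if eo = "" then (cs, cv, co, es, ev, eo ++ word) else (cs, cv, co, es, ev, eo)

def translate_svo (sentence : String) (translations : List (String × List (String × String))) :
    String × String :=
  let words := PySem.Str.split₀ sentence
  match words.foldl (pvA_step translations) ("", "", "", "", "", "") with
  | (cs, cv, co, es, ev, eo) =>
    (cs ++ cv ++ co,
     PySem.Str.strip (PySem.Str.join " " (([es, ev, eo]).filter (fun w => w ≠ ""))))

-- ===== PORT B =====
def pvB_classify (translations : List (String × List (String × String))) (word : String) :
    Option String :=
  let lw := PySem.Str.lower word
  if (PySem.Dict.get? (pvCatDict translations "subject") lw).isSome then some "subject"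
  else if (PySem.Dict.get? (pvCatDict translations "verb") lw).isSome then some "verb"
  else if (PySem.Dict.get? (pvCatDict translations "object") lw).isSome then some "object"
  else none

-- next((w for (w, c) in tagged if pred(c)), '')
def pvB_first (tagged : List (String × Option String)) (p : Option String → Bool) : String :=
  (Option.map Prod.fst (tagged.find? (fun t => p t.2))).getD ""

-- the translations, in input order, of the words tagged with category c
def pvB_chiPart (translations : List (String × List (String × String)))
    (tagged : List (String × Option String)) (c : String) : List String :=
  tagged.filterMap (fun t =>
    if t.2 = some c then some (PySem.Dict.getD (pvCatDict translations c) (PySem.Str.lower t.1) "")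
    else none)

def translate_svo_alt (sentence : String) (translations : List (String × List (String × String))) :
    String × String :=
  let tagged := (PySem.Str.split₀ sentence).map (fun w => (w, pvB_classify translations w))
  let chi := PySem.Str.join ""
    ((["subject", "verb", "object"]).flatMap (pvB_chiPart translations tagged))
  let eng := [pvB_first tagged (fun o => o == some "subject"),
              pvB_first tagged (fun o => o == some "verb"),
              pvB_first tagged (fun o => o == some "object" || o == none)]
  (chi, PySem.Str.join " " (eng.filter (fun w => w ≠ "")))

-- ===== PRECONDITION & SPEC =====
-- Pre_ excludes exactly the inputs on which A raises KeyError: some word's category-lookup chain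
-- reaches a key ('subject', then 'verb', then 'object') missing from translations; B raises there too.
def Pre_translate_svo (sentence : String) (translations : List (String × List (String × String))) : Prop :=
  ∀ w ∈ PySem.Str.split₀ sentence,
    (PySem.Dict.mk translations).contains "subject" = true ∧
    ((PySem.Dict.get? (PySem.Dict.mk (PySem.Dict.getD (PySem.Dict.mk translations) "subject" []))
        (PySem.Str.lower w)).isSome = true ∨
     ((PySem.Dict.mk translations).contains "verb" = true ∧
      ((PySem.Dict.get? (PySem.Dict.mk (PySem.Dict.getD (PySem.Dict.mk translations) "verb" []))
          (PySem.Str.lower w)).isSome = true ∨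
       (PySem.Dict.mk translations).contains "object" = true)))
instance (sentence : String) (translations : List (String × List (String × String))) : Decidable (Pre_translate_svo sentence translations) := by unfold Pre_translate_svo; infer_instance

def pvWitness_translate_svo : String × (List (String × List (String × String))) :=
  ("The dog eats rice", [("subject", [("dog", "G")]), ("verb", [("eats", "E")]), ("object", [("rice", "R")])])

def Spec_translate_svo (sentence : String) (translations : List (String × List (String × String))) (out : String × String) : Prop := out = translate_svo_alt sentence translations
instance (sentence : String) (translations : List (String × List (String × String))) (out : String × String) : Decidable (Spec_translate_svo sentence translations out) := by unfold Spec_translate_svo; infer_instance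

-- ===== CLAIM (what is proved, stated in full; the proofs are below) =====
def Claim_equal_translate_svo : Prop := ∀ (sentence : String) (translations : List (String × List (String × String))), Dom_translate_svo sentence translations → Pre_translate_svo sentence translations → Spec_translate_svo sentence translations (translate_svo sentence translations)

-- ===== LEMMAS AND PROOFS =====

-- "set the slot only if it is still empty", A's eng-reconstruction update
def pvFb (x y : String) : String := if x = "" then y else x

def pvTag (T : List (String × List (String × String))) (ws : List String) :
    List (String × Option String) :=
  ws.map (fun w => (w, pvB_classify T w))

lemma pvFb_absorb (x w y : String) (hw : w ≠ "") : pvFb (pvFb x w) y = pvFb x w := by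
  unfold pvFb; by_cases h : x = "" <;> simp [h, hw]

lemma pvJoin_nil_cons (x : String) (l : List String) :
    PySem.Str.join "" (x :: l) = x ++ PySem.Str.join "" l := by
  apply String.toList_inj.mp
  simp [PySem.Str.toList_join]
  cases l with
  | nil => simp
  | cons y ys => simp [PySem.Chars.join] at *; simp [List.intercalate, List.intersperse]

lemma pvJoin_nil_append (a b : List String) :
    PySem.Str.join "" (a ++ b) = PySem.Str.join "" a ++ PySem.Str.join "" b := by
  induction a with
  | nil =>
    apply String.toList_inj.mp
    simp [PySem.Str.toList_join, PySem.Chars.join, List.intercalate]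
  | cons x xs ih => simp [pvJoin_nil_cons, ih, String.append_assoc]

lemma pvJoin_nil_nil : PySem.Str.join "" ([] : List String) = "" := by
  apply String.toList_inj.mp
  simp [PySem.Str.toList_join, PySem.Chars.join, List.intercalate]

lemma pvFb_empty (x : String) : pvFb x "" = x := by
  unfold pvFb; by_cases h : x = "" <;> simp [h]

lemma pvFirst_cons (w : String) (cls : Option String) (tg : List (String × Option String))
    (p : Option String → Bool) :
    pvB_first ((w, cls) :: tg) p = if p cls then w else pvB_first tg p := by
  unfold pvB_first
  by_cases h : p cls = true <;> simp [h]

lemma pvChiPart_cons (T : List (String × List (String × String))) (w : String)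
    (cls : Option String) (tg : List (String × Option String)) (c : String) :
    pvB_chiPart T ((w, cls) :: tg) c =
      if cls = some c then
        PySem.Dict.getD (pvCatDict T c) (PySem.Str.lower w) "" :: pvB_chiPart T tg c
      else pvB_chiPart T tg c := by
  unfold pvB_chiPart
  by_cases h : cls = some c <;> simp [h]

lemma pvFoldA (T : List (String × List (String × String))) (ws : List String)
    (hw : ∀ w ∈ ws, w ≠ "") (cs cv co es ev eo : String) :
    ws.foldl (pvA_step T) (cs, cv, co, es, ev, eo) =
      (cs ++ PySem.Str.join "" (pvB_chiPart T (pvTag T ws) "subject"),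
       cv ++ PySem.Str.join "" (pvB_chiPart T (pvTag T ws) "verb"),
       co ++ PySem.Str.join "" (pvB_chiPart T (pvTag T ws) "object"),
       pvFb es (pvB_first (pvTag T ws) (fun o => o == some "subject")),
       pvFb ev (pvB_first (pvTag T ws) (fun o => o == some "verb")),
       pvFb eo (pvB_first (pvTag T ws) (fun o => o == some "object" || o == none))) := by
  induction ws generalizing cs cv co es ev eo with
  | nil =>
    simp [pvTag, pvB_chiPart, pvB_first, pvJoin_nil_nil, pvFb_empty]
  | cons w rest ih =>
    have hw0 : w ≠ "" := hw w (List.mem_cons_self)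
    have hrest : ∀ v ∈ rest, v ≠ "" := fun v hv => hw v (List.mem_cons_of_mem _ hv)
    have htag : pvTag T (w :: rest) = (w, pvB_classify T w) :: pvTag T rest := by simp [pvTag]
    simp only [List.foldl_cons]
    rcases hs : PySem.Dict.get? (pvCatDict T "subject") (PySem.Str.lower w) with _ | t
    · rcases hv : PySem.Dict.get? (pvCatDict T "verb") (PySem.Str.lower w) with _ | t
      · rcases ho : PySem.Dict.get? (pvCatDict T "object") (PySem.Str.lower w) with _ | t
        · -- unrecognized word
          have hcls : pvB_classify T w = none := by simp [pvB_classify, hs, hv, ho]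
          have hstep : pvA_step T (cs, cv, co, es, ev, eo) w =
              (cs, cv, co, es, ev, pvFb eo w) := by
            by_cases h : eo = "" <;> simp [pvA_step, pvFb, hs, hv, ho, h]
          rw [hstep, ih hrest, htag]
          simp only [pvChiPart_cons, pvFirst_cons, hcls]
          simp [pvFb_absorb _ _ _ hw0]
        · -- object word
          have hcls : pvB_classify T w = some "object" := by simp [pvB_classify, hs, hv, ho]
          have hstep : pvA_step T (cs, cv, co, es, ev, eo) w =
              (cs, cv, co ++ t, es, ev, pvFb eo w) := by
            simp [pvA_step, pvFb, hs, hv, ho]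
          rw [hstep, ih hrest, htag]
          simp only [pvChiPart_cons, pvFirst_cons, hcls]
          simp [pvJoin_nil_cons, PySem.Dict.getD, ho, String.append_assoc,
            pvFb_absorb _ _ _ hw0]
      · -- verb word
        have hcls : pvB_classify T w = some "verb" := by simp [pvB_classify, hs, hv]
        have hstep : pvA_step T (cs, cv, co, es, ev, eo) w =
            (cs, cv ++ t, co, es, pvFb ev w, eo) := by
          simp [pvA_step, pvFb, hs, hv]
        rw [hstep, ih hrest, htag]
        simp only [pvChiPart_cons, pvFirst_cons, hcls]
        simp [pvJoin_nil_cons, PySem.Dict.getD, hv, String.append_assoc,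
          pvFb_absorb _ _ _ hw0]
    · -- subject word
      have hcls : pvB_classify T w = some "subject" := by simp [pvB_classify, hs]
      have hstep : pvA_step T (cs, cv, co, es, ev, eo) w =
          (cs ++ t, cv, co, pvFb es w, ev, eo) := by
        simp [pvA_step, pvFb, hs]
      rw [hstep, ih hrest, htag]
      simp only [pvChiPart_cons, pvFirst_cons, hcls]
      simp [pvJoin_nil_cons, PySem.Dict.getD, hs, String.append_assoc,
        pvFb_absorb _ _ _ hw0]

lemma pvB_first_mem (tg : List (String × Option String)) (p : Option String → Bool) :
    pvB_first tg p = "" ∨ ∃ t ∈ tg, pvB_first tg p = t.1 := by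
  unfold pvB_first
  cases h : tg.find? (fun t => p t.2) with
  | none => simp
  | some t => exact Or.inr ⟨t, List.mem_of_find?_eq_some h, by simp⟩

lemma pvGo_tokens (s cur acc) (hc : ∀ c ∈ cur, PySem.Chars.isspace c = false)
    (ha : ∀ w ∈ acc, w ≠ [] ∧ ∀ c ∈ w, PySem.Chars.isspace c = false) :
    ∀ w ∈ PySem.Chars.split₀.go s cur acc, w ≠ [] ∧ ∀ c ∈ w, PySem.Chars.isspace c = false := by
  induction s generalizing cur acc with
  | nil =>
    intro w hwmem
    by_cases hcur : cur.isEmpty = true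
    · simp only [PySem.Chars.split₀.go, hcur, if_true] at hwmem
      exact ha w (List.mem_reverse.mp hwmem)
    · simp only [PySem.Chars.split₀.go, hcur] at hwmem
      rcases List.mem_cons.mp (List.mem_reverse.mp hwmem) with h | h
      · subst h
        refine ⟨by simpa [List.isEmpty_iff] using hcur, ?_⟩
        intro d hd; exact hc d (List.mem_reverse.mp hd)
      · exact ha w h
  | cons c rest ih =>
    intro w hwmem
    by_cases hsp : PySem.Chars.isspace c = true
    · by_cases hcur : cur.isEmpty = true
      · simp only [PySem.Chars.split₀.go, hsp, hcur, if_true] at hwmem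
        exact ih [] acc (by simp) ha w hwmem
      · simp only [PySem.Chars.split₀.go, hsp, hcur, if_true] at hwmem
        refine ih [] _ (by simp) ?_ w hwmem
        intro v hv
        rcases List.mem_cons.mp hv with h | h
        · subst h
          refine ⟨by simpa [List.isEmpty_iff] using hcur, ?_⟩
          intro d hd; exact hc d (List.mem_reverse.mp hd)
        · exact ha v h
    · simp only [PySem.Chars.split₀.go, hsp] at hwmem
      refine ih (c :: cur) acc ?_ ha w hwmem
      intro d hd
      rcases List.mem_cons.mp hd with h | h
      · subst h; simpa using hsp
      · exact hc d h

lemma pvSplit_tokens (s : String) :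
    ∀ w ∈ PySem.Str.split₀ s, w ≠ "" ∧ ∀ c ∈ w.toList, PySem.Chars.isspace c = false := by
  intro w hw
  have hmem : w.toList ∈ PySem.Chars.split₀ s.toList := by
    rw [← PySem.Str.split₀_map_toList]
    exact List.mem_map_of_mem hw
  have := pvGo_tokens s.toList [] [] (by simp) (by simp) w.toList hmem
  exact ⟨fun h => this.1 (by simp [h]), this.2⟩

lemma pvLstrip_eq (l : List Char) (h : ∀ c, l.head? = some c → PySem.Chars.isspace c = false) :
    PySem.Chars.lstrip l = l := by
  cases l with
  | nil => simp [PySem.Chars.lstrip]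
  | cons c cs => simp [PySem.Chars.lstrip, h c rfl]

lemma pvRstrip_eq (l : List Char) (h : ∀ c, l.getLast? = some c → PySem.Chars.isspace c = false) :
    PySem.Chars.rstrip l = l := by
  have : PySem.Chars.lstrip l.reverse = l.reverse := by
    apply pvLstrip_eq
    intro c hc
    exact h c (by simpa using hc)
  simpa [PySem.Chars.rstrip, PySem.Chars.lstrip] using congrArg List.reverse this

lemma pvJoin_head (ps : List (List Char)) (hne : ps ≠ []) (h : ∀ p ∈ ps, p ≠ []) :
    ∃ c, (PySem.Chars.join [' '] ps).head? = some c ∧ ∃ p ∈ ps, c ∈ p := by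
  cases ps with
  | nil => exact absurd rfl hne
  | cons p rest =>
    have hp := h p (by simp)
    cases rest with
    | nil =>
      cases p with
      | nil => exact absurd rfl hp
      | cons a as =>
        exact ⟨a, by simp [PySem.Chars.join, List.intercalate], a :: as, by simp, by simp⟩
    | cons q qs =>
      cases p with
      | nil => exact absurd rfl hp
      | cons a as =>
        refine ⟨a, ?_, a :: as, by simp, by simp⟩
        rw [PySem.Chars.join_cons_cons]
        simp

lemma pvJoin_last (ps : List (List Char)) (hne : ps ≠ []) (h : ∀ p ∈ ps, p ≠ []) :
    ∃ c, (PySem.Chars.join [' '] ps).getLast? = some c ∧ ∃ p ∈ ps, c ∈ p := by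
  induction ps with
  | nil => exact absurd rfl hne
  | cons p rest ih =>
    cases rest with
    | nil =>
      have hp := h p (by simp)
      refine ⟨p.getLast hp, ?_, p, by simp, List.getLast_mem hp⟩
      simp [PySem.Chars.join, List.intercalate]
      exact List.getLast?_eq_some_getLast hp
    | cons q qs =>
      obtain ⟨c, hc1, p', hp', hc2⟩ := ih (by simp) (fun x hx => h x (by simp [hx]))
      refine ⟨c, ?_, p', by simp [hp'], hc2⟩
      rw [PySem.Chars.join_cons_cons]
      have hnil : PySem.Chars.join [' '] (q :: qs) ≠ [] := by
        intro hh; rw [hh] at hc1; simp at hc1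
      rw [List.append_assoc, List.getLast?_append_of_ne_nil _ (by simp),
        List.getLast?_append_of_ne_nil _ hnil]
      exact hc1

lemma pvStrip_join (parts : List String)
    (h : ∀ x ∈ parts, x ≠ "" ∧ ∀ c ∈ x.toList, PySem.Chars.isspace c = false) :
    PySem.Str.strip (PySem.Str.join " " parts) = PySem.Str.join " " parts := by
  apply String.toList_inj.mp
  rw [PySem.Str.toList_strip, PySem.Str.toList_join]
  have hsep : (" " : String).toList = [' '] := rfl
  rw [hsep]
  cases parts with
  | nil => simp [PySem.Chars.join, List.intercalate, PySem.Chars.strip, PySem.Chars.lstrip, PySem.Chars.rstrip]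
  | cons x xs =>
    have hne : (x :: xs).map String.toList ≠ [] := by simp
    have hps : ∀ p ∈ (x :: xs).map String.toList, p ≠ [] := by
      intro p hp
      obtain ⟨y, hy, rfl⟩ := List.mem_map.mp hp
      intro hnil
      exact (h y hy).1 (String.toList_inj.mp (by simpa using hnil))
    obtain ⟨c1, hh1, p1, hp1, hc1⟩ := pvJoin_head _ hne hps
    obtain ⟨c2, hh2, p2, hp2, hc2⟩ := pvJoin_last _ hne hps
    have hns1 : PySem.Chars.isspace c1 = false := by
      obtain ⟨y, hy, rfl⟩ := List.mem_map.mp hp1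
      exact (h y hy).2 c1 hc1
    have hns2 : PySem.Chars.isspace c2 = false := by
      obtain ⟨y, hy, rfl⟩ := List.mem_map.mp hp2
      exact (h y hy).2 c2 hc2
    unfold PySem.Chars.strip
    rw [pvLstrip_eq _ (fun d hd => by rw [hh1] at hd; cases hd; exact hns1)]
    rw [pvRstrip_eq _ (fun d hd => by rw [hh2] at hd; cases hd; exact hns2)]

-- ===== VERDICT (by name: the statement is the Claim_ definition above) =====
lemma pvFb_blank (y : String) : pvFb "" y = y := by simp [pvFb]

lemma pvFirst_ok (s : String) (T : List (String × List (String × String)))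
    (p : Option String → Bool) (x : String)
    (hx : pvB_first (pvTag T (PySem.Str.split₀ s)) p = x) (hne : x ≠ "") :
    ∀ c ∈ x.toList, PySem.Chars.isspace c = false := by
  rcases pvB_first_mem (pvTag T (PySem.Str.split₀ s)) p with h | ⟨t, ht, h⟩
  · exact absurd (hx ▸ h) (by simpa using hne)
  · obtain ⟨w, hw, rfl⟩ := List.mem_map.mp ht
    rw [hx] at h
    rw [h]
    exact (pvSplit_tokens s w hw).2

theorem translate_svo_spec : Claim_equal_translate_svo := by
  intro s T _ _
  unfold Spec_translate_svo translate_svo translate_svo_alt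
  have hw : ∀ w ∈ PySem.Str.split₀ s, w ≠ "" := fun w h => (pvSplit_tokens s w h).1
  simp only [show ((PySem.Str.split₀ s).map fun w => (w, pvB_classify T w)) =
      pvTag T (PySem.Str.split₀ s) from rfl, pvFoldA T _ hw]
  refine Prod.ext ?_ ?_
  · -- Chinese side
    simp [List.flatMap, pvJoin_nil_append, String.append_assoc]
  · -- English side
    simp only [pvFb_blank]
    apply pvStrip_join
    intro x hx
    rw [List.mem_filter] at hx
    have hne : x ≠ "" := by simpa using hx.2
    refine ⟨hne, ?_⟩
    have hmem := hx.1
    simp only [List.mem_cons, List.not_mem_nil, or_false] at hmem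
    rcases hmem with h | h | h <;> exact pvFirst_ok s T _ x h.symm hne
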